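-- pv_equiv track=rewrite | github.com/Kjean13/ADFT | adft/detection/rules/service_account_abuse.py | _is_service_account
-- ===== SOURCE A (Python) =====
-- _SVC_PREFIXES = ("svc_", "svc-", "service_", "srv_", "sa_", "app_", "_svc")
--
-- _SVC_SUFFIXES = ("_svc", "_service", "_app", "_sa", "$")
--
-- _SYSTEM_ACCOUNTS = {
--     "system",
--     "network service",
--     "local service",
--     "anonymous logon",
--     "iusr",
--     "iwam_",
--     "aspnet",
--     "-",
--     "",
-- }
--
-- def _is_service_account(username: str) -> bool:
--     """Heuristique pour identifier un compte de service AD."""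
--     if not username:
--         return False
--     u = username.lower().strip()
--     if u in _SYSTEM_ACCOUNTS:
--         return False
--     if any(u.startswith(p) for p in _SVC_PREFIXES):
--         return True
--     if any(u.endswith(s) for s in _SVC_SUFFIXES):
--         return True
--     return False
-- ===== SOURCE B (Python) =====
-- _SYSTEM_ACCOUNTS = {
--     "system",
--     "network service",
--     "local service",
--     "anonymous logon",
--     "iusr",
--     "iwam_",
--     "aspnet",
--     "-",
--     "",
-- }
--
--
-- def _build_trie(patterns):
--     # trie node: dict char -> (accept_after_this_char, child_node)
--     root = {}
--     for p in patterns: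
--         node = root
--         for i, ch in enumerate(p):
--             acc, child = node.get(ch, (False, {}))
--             if i == len(p) - 1:
--                 acc = True
--             node[ch] = (acc, child)
--             node = child
--     return root
--
--
-- def _trie_match(trie, s):
--     # single left-to-right scan of s through the trie
--     node = trie
--     for ch in s:
--         ent = node.get(ch)
--         if ent is None:
--             return False
--         acc, node = ent
--         if acc:
--             return True
--     return False
--
--
-- _PREFIX_TRIE = _build_trie(
--     ("svc_", "svc-", "service_", "srv_", "sa_", "app_", "_svc"))
-- _SUFFIX_TRIE = _build_trie(
--     tuple(s[::-1] for s in ("_svc", "_service", "_app", "_sa", "$")))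
--
--
-- def _is_service_account(username: str) -> bool:
--     """Heuristique pour identifier un compte de service AD."""
--     if not username:
--         return False
--     u = username.lower().strip()
--     return u not in _SYSTEM_ACCOUNTS and (
--         _trie_match(_PREFIX_TRIE, u) or _trie_match(_SUFFIX_TRIE, u[::-1])
--     )
-- ===== Notes on version B (the rewrite author's own statement) =====
-- stated objective: alternative
-- what changed: Replaces the per-affix startswith/endswith scans with two tries precompiled from the affix tuples (prefixes as-is, suffixes reversed): the normalized name is scanned once left-to-right through the prefix trie and its reversal once through the suffix trie, instead of looping over the affix tuples.
import Mathlib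
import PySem

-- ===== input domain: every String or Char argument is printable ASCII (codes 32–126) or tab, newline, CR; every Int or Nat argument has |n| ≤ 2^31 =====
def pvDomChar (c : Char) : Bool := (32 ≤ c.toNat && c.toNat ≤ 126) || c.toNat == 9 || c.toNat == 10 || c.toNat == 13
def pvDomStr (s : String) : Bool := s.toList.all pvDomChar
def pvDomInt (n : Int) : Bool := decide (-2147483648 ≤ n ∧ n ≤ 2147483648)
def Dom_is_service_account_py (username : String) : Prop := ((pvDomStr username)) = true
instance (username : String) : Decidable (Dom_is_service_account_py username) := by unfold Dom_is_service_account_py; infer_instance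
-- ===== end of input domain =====

-- B replaces the per-affix startswith/endswith scans by two precompiled tries (prefixes, and
-- reversed suffixes run over the reversed string), each scanned in a single pass (objective: alternative).

-- ===== PORT A =====
def svcPrefixes : List String := ["svc_", "svc-", "service_", "srv_", "sa_", "app_", "_svc"]
def svcSuffixes : List String := ["_svc", "_service", "_app", "_sa", "$"]
def systemAccounts : PySem.Set String :=
  PySem.Set.ofList ["system", "network service", "local service", "anonymous logon",
                    "iusr", "iwam_", "aspnet", "-", ""]

def is_service_account_py (username : String) : Bool :=
  if username == "" then false
  else
    let u := PySem.Str.strip (PySem.Str.lower username)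
    if PySem.Set.contains systemAccounts u then false
    else if svcPrefixes.any (fun p => PySem.Str.startswith u p) then true
    else if svcSuffixes.any (fun s => PySem.Str.endswith u s) then true
    else false

-- ===== PORT B =====
-- A trie node is a Python dict {char: (accept, child)}; ported as an edge list in insertion
-- order, encoded left-child/right-sibling (node c acc child sib = entry (c ↦ (acc, child)) :: sib).
inductive PTrie where
  | nil
  | node (c : Char) (acc : Bool) (child sib : PTrie)
deriving DecidableEq

-- node.get(ch): first (= unique) entry for c, in dict insertion order
def getEdge : PTrie → Char → Option (Bool × PTrie)
  | .nil, _ => none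
  | .node c' a ch sib, c => if c = c' then some (a, ch) else getEdge sib c

-- node[ch] = (acc, child): overwrite in place, or append a new entry at the end
def setEdge : PTrie → Char → Bool → PTrie → PTrie
  | .nil, c, a, ch => .node c a ch .nil
  | .node c' a' ch' sib, c, a, ch =>
      if c = c' then .node c' a ch sib else .node c' a' ch' (setEdge sib c a ch)

-- one pattern of _build_trie's outer loop: walk/extend the trie along the pattern,
-- marking the entry consuming the last char as accepting
def insertT (t : PTrie) : List Char → PTrie
  | [] => t
  | c :: cs =>
      let e := (getEdge t c).getD (false, .nil)
      setEdge t c (e.1 || cs.isEmpty) (insertT e.2 cs)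

-- _trie_match: scan s left to right through the trie
def trieMatch (t : PTrie) : List Char → Bool
  | [] => false
  | c :: rest =>
      match getEdge t c with
      | none => false
      | some (a, ch) => if a then true else trieMatch ch rest

def prefixTrie : PTrie := svcPrefixes.foldl (fun t p => insertT t p.toList) .nil
-- suffix trie is built from the reversed suffixes (s[::-1])
def suffixTrie : PTrie := svcSuffixes.foldl (fun t s => insertT t s.toList.reverse) .nil

def is_service_account_py_alt (username : String) : Bool :=
  if username == "" then false
  else
    let u := PySem.Str.strip (PySem.Str.lower username)
    -- u[::-1] ported as the reversed char list (exact)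
    !(PySem.Set.contains systemAccounts u) &&
      (trieMatch prefixTrie u.toList || trieMatch suffixTrie u.toList.reverse)

-- ===== PRECONDITION & SPEC =====
def Spec_is_service_account_py (username : String) (out : Bool) : Prop := out = is_service_account_py_alt username
instance (username : String) (out : Bool) : Decidable (Spec_is_service_account_py username out) := by unfold Spec_is_service_account_py; infer_instance

-- ===== CLAIM (what is proved, stated in full; the proofs are below) =====
def Claim_equal_is_service_account_py : Prop := ∀ (username : String), Dom_is_service_account_py username → Spec_is_service_account_py username (is_service_account_py username)

-- ===== LEMMAS AND PROOFS =====

-- proof-side sibling-recursive reformulation of trieMatch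
def matchR : PTrie → List Char → Bool
  | .nil, _ => false
  | .node c' a ch sib, cs =>
      match cs with
      | [] => false
      | c :: rest =>
          if c = c' then (if a then true else matchR ch rest)
          else matchR sib (c :: rest)
termination_by t cs => (cs.length, sizeOf t)

-- the strings accepted by a trie
def words : PTrie → List (List Char)
  | .nil => []
  | .node c a ch sib =>
      (if a then [[c]] else []) ++ (words ch).map (c :: ·) ++ words sib

def keys : PTrie → List Char
  | .nil => []
  | .node c _ _ sib => c :: keys sib

-- well-formedness: sibling chars distinct (dict keys are unique)
def wfT : PTrie → Bool
  | .nil => true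
  | .node c _ ch sib => !(keys sib).contains c && wfT ch && wfT sib

theorem trieMatch_eq_matchR (cs : List Char) (t : PTrie) : trieMatch t cs = matchR t cs := by
  induction cs generalizing t with
  | nil => cases t <;> simp [trieMatch, matchR]
  | cons c rest ih =>
    induction t with
    | nil => simp [trieMatch, matchR, getEdge]
    | node c' a ch sib ihc ihs =>
      simp only [trieMatch, matchR, getEdge]
      by_cases hx : c = c'
      · simp only [if_pos hx]
        split <;> simp [ih]
      · simp only [if_neg hx]
        simpa [trieMatch] using ihs

theorem words_head (t : PTrie) (w : List Char) (hw : w ∈ words t) :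
    ∃ c w', w = c :: w' ∧ c ∈ keys t := by
  induction t with
  | nil => simp [words] at hw
  | node c a ch sib ihc ihs =>
    simp only [words, List.mem_append, List.mem_map] at hw
    rcases hw with (h | ⟨w', _, rfl⟩) | h
    · refine ⟨c, [], ?_, by simp [keys]⟩
      split at h <;> simp_all
    · exact ⟨c, w', rfl, by simp [keys]⟩
    · obtain ⟨c', w', rfl, hc⟩ := ihs h
      exact ⟨c', w', rfl, by simp [keys, hc]⟩

theorem matchR_words (t : PTrie) (hw : wfT t = true) (cs : List Char) :
    matchR t cs = (words t).any (fun w => w.isPrefixOf cs) := by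
  induction t generalizing cs with
  | nil => simp [matchR, words]
  | node c a ch sib ihc ihs =>
    simp only [wfT, Bool.and_eq_true, Bool.not_eq_true'] at hw
    obtain ⟨⟨hk, hwc⟩, hws⟩ := hw
    match cs with
    | [] =>
      simp only [matchR, words, List.any_append, List.any_map]
      have h1 : ((if a then [[c]] else [] : List (List Char)).any (fun w => w.isPrefixOf [])) = false := by
        split <;> simp
      have h3 : (words sib).any (fun w => w.isPrefixOf []) = false := by
        simp only [List.any_eq_false]
        intro w hwmem
        obtain ⟨c', w', rfl, _⟩ := words_head sib w hwmem
        simp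
      simp [h1, h3, Function.comp]
    | x :: xs =>
      simp only [matchR, words, List.any_append, List.any_map]
      by_cases hx : x = c
      · subst hx
        have h3 : (words sib).any (fun w => w.isPrefixOf (x :: xs)) = false := by
          simp only [List.any_eq_false]
          intro w hwmem
          obtain ⟨c', w', rfl, hc'⟩ := words_head sib w hwmem
          have : c' ≠ x := by
            rintro rfl
            rw [List.contains_eq_mem] at hk
            simp [hc'] at hk
          simp [List.isPrefixOf, this]
        rw [ihc hwc]
        have h1 : ((if a then [[x]] else [] : List (List Char)).any (fun w => w.isPrefixOf (x :: xs))) = a := by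
          split <;> simp_all [List.isPrefixOf]
        have h2 : (words ch).any (fun w => (x :: w).isPrefixOf (x :: xs)) = (words ch).any (fun w => w.isPrefixOf xs) := by
          refine List.any_congr rfl (fun w => ?_)
          simp [List.isPrefixOf]
        simp only [Function.comp_def, h1, h2, h3, Bool.or_false]
        rw [if_pos trivial]
        cases a <;> simp
      · simp only [if_neg hx]
        rw [ihs hws]
        have h1 : ((if a then [[c]] else [] : List (List Char)).any (fun w => w.isPrefixOf (x :: xs))) = false := by
          split <;> simp_all [List.isPrefixOf, Ne.symm hx]
        have h2 : (words ch).any (fun w => (c :: w).isPrefixOf (x :: xs)) = false := by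
          rw [List.any_eq_false]
          intro w _
          simp [List.isPrefixOf, Ne.symm hx]
        simp only [Function.comp_def, h1, h2, Bool.false_or]

theorem prefix_match (u : String) :
    trieMatch prefixTrie u.toList = svcPrefixes.any (fun p => PySem.Str.startswith u p) := by
  rw [trieMatch_eq_matchR, matchR_words prefixTrie (by decide)]
  have hw : words prefixTrie = svcPrefixes.map (fun p => p.toList) := by decide
  rw [hw, List.any_map]
  refine List.any_congr rfl (fun p => ?_)
  rw [Bool.eq_iff_iff]
  simp [PySem.Str.startswith_eq, PySem.Chars.startswith_iff, List.isPrefixOf_iff_prefix]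

theorem suffix_match (u : String) :
    trieMatch suffixTrie u.toList.reverse = svcSuffixes.any (fun s => PySem.Str.endswith u s) := by
  rw [trieMatch_eq_matchR, matchR_words suffixTrie (by decide)]
  have hw : words suffixTrie = svcSuffixes.map (fun s => s.toList.reverse) := by decide
  rw [hw, List.any_map]
  refine List.any_congr rfl (fun s => ?_)
  rw [Bool.eq_iff_iff]
  simp [PySem.Str.endswith_eq, PySem.Chars.endswith_iff, List.isPrefixOf_iff_prefix,
        List.reverse_prefix]

-- ===== VERDICT (by name: the statement is the Claim_ definition above) =====
theorem is_service_account_py_spec : Claim_equal_is_service_account_py := by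
  intro username _
  unfold Spec_is_service_account_py is_service_account_py is_service_account_py_alt
  by_cases h0 : (username == "") = true
  · rw [if_pos h0, if_pos h0]
  · rw [if_neg h0, if_neg h0]
    dsimp only
    set u := PySem.Str.strip (PySem.Str.lower username) with hu
    rw [prefix_match u, suffix_match u]
    generalize PySem.Set.contains systemAccounts u = M
    generalize svcPrefixes.any (fun p => PySem.Str.startswith u p) = P
    generalize svcSuffixes.any (fun s => PySem.Str.endswith u s) = Q
    cases M <;> cases P <;> cases Q <;> rfl
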